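-- pv_equiv track=rewrite | github.com/Gino-Loja/python-ML | nada/ejercicio2.py | vocal_frecuente
-- ===== SOURCE A (Python) =====
-- def vocal_frecuente(texto):
--     frecuencia_vocales = {'a': 0, 'e': 0, 'i': 0, 'o': 0, 'u': 0}
--
--     # Convertir el texto a minúsculas
--     texto = texto.lower()
--
--     # Recorrer el texto y contar la frecuencia de las vocales sin tildes
--     for caracter in texto:
--         if caracter in frecuencia_vocales:
--             frecuencia_vocales[caracter] += 1
--
--     # Encontrar la frecuencia máxima
--     max_frecuencia = max(frecuencia_vocales.values())
--
--
--     vocales_frecuentes = []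
--     for letra in frecuencia_vocales:
--         repeticion = frecuencia_vocales.get(letra)
--         if repeticion > 1:
--             vocales_frecuentes.append(letra)
--
--     if max_frecuencia == 0:
--         return 'No hay vocales en el texto'
--     else:
--         return ', '.join(vocales_frecuentes)
-- ===== SOURCE B (Python) =====
-- def vocal_frecuente(texto):
--     # Idiomatic rewrite: one counting comprehension per vowel instead of a
--     # single dict-updating pass, then a zip-filter join.
--     t = texto.lower()
--     conteos = [sum(c == v for c in t) for v in 'aeiou']
--     if max(conteos) == 0:
--         return 'No hay vocales en el texto'
--     return ', '.join(v for v, n in zip('aeiou', conteos) if n > 1)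
-- ===== Notes on version B (the rewrite author's own statement) =====
-- stated objective: idiomatic
-- what changed: Replaces A's single character-by-character pass that updates a pre-seeded frequency dict (plus a separate key loop collecting frequent vowels) with one counting comprehension per vowel and a zip-filter join over the fixed vowel order.
import Mathlib
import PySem

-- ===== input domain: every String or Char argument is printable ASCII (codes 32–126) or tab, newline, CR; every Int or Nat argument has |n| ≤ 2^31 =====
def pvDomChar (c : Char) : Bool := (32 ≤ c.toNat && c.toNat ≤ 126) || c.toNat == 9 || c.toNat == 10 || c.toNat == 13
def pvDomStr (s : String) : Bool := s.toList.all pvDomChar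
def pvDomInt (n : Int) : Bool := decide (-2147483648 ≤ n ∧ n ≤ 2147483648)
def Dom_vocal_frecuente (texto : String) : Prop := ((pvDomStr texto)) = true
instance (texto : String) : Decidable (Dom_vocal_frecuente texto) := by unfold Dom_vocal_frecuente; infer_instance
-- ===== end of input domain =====

-- B replaces A's single dict-updating pass over the text (plus a key loop) by one
-- counting comprehension per vowel and a zip-filter join (objective: idiomatic; same cost).

-- ===== PORT A =====
-- the loop body 'if caracter in frecuencia_vocales: frecuencia_vocales[caracter] += 1'
def stepA (d : PySem.Dict Char Int) (c : Char) : PySem.Dict Char Int :=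
  if d.contains c then d.modify c 0 (· + 1) else d

def vocal_frecuente (texto : String) : String :=
  let frec0 : PySem.Dict Char Int :=
    PySem.Dict.ofList [('a',0),('e',0),('i',0),('o',0),('u',0)]
  let t := (PySem.Str.lower texto).toList
  let frec := t.foldl stepA frec0
  let maxF := (PySem.List.max? frec.values (fun x => x)).getD 0   -- values is nonempty, so max() never raises
  let vf := frec.keys.foldl
      (fun acc k => if 1 < frec.getD k 0 then acc ++ [k] else acc) ([] : List Char)
  if maxF == 0 then "No hay vocales en el texto"
  else PySem.Str.join ", " (vf.map (fun c => String.ofList [c]))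

-- ===== PORT B =====
def vocal_frecuente_alt (texto : String) : String :=
  let t := (PySem.Str.lower texto).toList
  let conteos := ['a','e','i','o','u'].map
      (fun v => (t.map (fun c => if c == v then (1:Int) else 0)).sum)   -- sum(c == v for c in t)
  if (PySem.List.max? conteos (fun x => x)).getD 0 == 0 then
    "No hay vocales en el texto"
  else
    PySem.Str.join ", "
      (((['a','e','i','o','u'].zip conteos).filter (fun p => 1 < p.2)).map
        (fun p => String.ofList [p.1]))

-- ===== PRECONDITION & SPEC =====
def Spec_vocal_frecuente (texto : String) (out : String) : Prop := out = vocal_frecuente_alt texto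
instance (texto : String) (out : String) : Decidable (Spec_vocal_frecuente texto out) := by unfold Spec_vocal_frecuente; infer_instance

-- ===== CLAIM (what is proved, stated in full; the proofs are below) =====
def Claim_equal_vocal_frecuente : Prop := ∀ (texto : String), Dom_vocal_frecuente texto → Spec_vocal_frecuente texto (vocal_frecuente texto)

-- ===== LEMMAS AND PROOFS =====
-- A's counting loop over any dict with exactly the five vowel keys just adds each vowel's count.
lemma foldA (t : List Char) (na ne ni no nu : Int) :
  t.foldl stepA (PySem.Dict.mk [('a',na),('e',ne),('i',ni),('o',no),('u',nu)]) =
  PySem.Dict.mk [('a',na + t.count 'a'),('e',ne + t.count 'e'),('i',ni + t.count 'i'),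
                 ('o',no + t.count 'o'),('u',nu + t.count 'u')] := by
  induction t generalizing na ne ni no nu with
  | nil => simp
  | cons c t ih =>
    by_cases ha : c = 'a'
    · subst ha
      simp [List.foldl_cons, stepA, PySem.Dict.contains, PySem.Dict.modify,
            PySem.Dict.getD, PySem.Dict.get?, PySem.Dict.insert, ih]
      ring
    · by_cases he : c = 'e'
      · subst he
        simp [List.foldl_cons, stepA, PySem.Dict.contains, PySem.Dict.modify,
              PySem.Dict.getD, PySem.Dict.get?, PySem.Dict.insert, ih]
        ring
      · by_cases hi : c = 'i'
        · subst hi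
          simp [List.foldl_cons, stepA, PySem.Dict.contains, PySem.Dict.modify,
                PySem.Dict.getD, PySem.Dict.get?, PySem.Dict.insert, ih]
          ring
        · by_cases ho : c = 'o'
          · subst ho
            simp [List.foldl_cons, stepA, PySem.Dict.contains, PySem.Dict.modify,
                  PySem.Dict.getD, PySem.Dict.get?, PySem.Dict.insert, ih]
            ring
          · by_cases hu : c = 'u'
            · subst hu
              simp [List.foldl_cons, stepA, PySem.Dict.contains, PySem.Dict.modify,
                    PySem.Dict.getD, PySem.Dict.get?, PySem.Dict.insert, ih]
              ring
            · simp [List.foldl_cons, stepA, PySem.Dict.contains, ih,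
                    ha, he, hi, ho, hu, Ne.symm]

-- B's 0/1-sum for a vowel is that vowel's count.
lemma sum_ones_eq_count (t : List Char) (v : Char) :
    (t.map (fun c => if c = v then (1:Int) else 0)).sum = (t.count v : Int) := by
  induction t with
  | nil => rfl
  | cons c t ih =>
    simp only [List.map_cons, List.sum_cons, ih, List.count_cons]
    by_cases h : c = v
    · simp [h]
      ring
    · simp [h]

lemma frec0_eq :
    PySem.Dict.ofList [('a',(0:Int)),('e',0),('i',0),('o',0),('u',0)] =
    PySem.Dict.mk [('a',0),('e',0),('i',0),('o',0),('u',0)] := by decide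

-- ===== VERDICT (by name: the statement is the Claim_ definition above) =====
theorem vocal_frecuente_spec : Claim_equal_vocal_frecuente := by
  intro texto _
  unfold Spec_vocal_frecuente vocal_frecuente vocal_frecuente_alt
  rw [frec0_eq]
  dsimp only
  rw [foldA]
  simp [PySem.Dict.values, PySem.Dict.keys, PySem.Dict.getD, PySem.Dict.get?_mk_cons,
        sum_ones_eq_count]
  by_cases h1 : (1:Nat) < List.count 'a' (PySem.Chars.lower texto.toList) <;>
  by_cases h2 : (1:Nat) < List.count 'e' (PySem.Chars.lower texto.toList) <;>
  by_cases h3 : (1:Nat) < List.count 'i' (PySem.Chars.lower texto.toList) <;>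
  by_cases h4 : (1:Nat) < List.count 'o' (PySem.Chars.lower texto.toList) <;>
  by_cases h5 : (1:Nat) < List.count 'u' (PySem.Chars.lower texto.toList) <;>
  simp [h1, h2, h3, h4, h5]
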